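-- pv_equiv track=rewrite | github.com/djslzx/arc | src/str/grammar.py | evaluate
-- ===== SOURCE A (Python) =====
-- from typing import List
--
-- def evaluate(s: str, Z: List[List[str]]) -> List[str]:
--     def eval_once(s: str, z: List[str]) -> str:
--         out = ''
--         for c in s:
--             try:
--                 i = int(c)
--                 out += z[i]
--             except ValueError:
--                 out += c
--         return out
--
--     return [eval_once(s, z) for z in Z]
-- ===== SOURCE B (Python) =====
-- from typing import List
--
-- def evaluate(s: str, Z: List[List[str]]) -> List[str]:
--     # Parse the template once into tokens: merged literal runs (str) and digit indices (int),
--     # then assemble each output by a single walk over the token list.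
--     tokens = []
--     buf = []
--     for c in s:
--         try:
--             i = int(c)
--         except ValueError:
--             buf.append(c)
--             continue
--         if buf:
--             tokens.append(''.join(buf))
--             buf = []
--         tokens.append(i)
--     if buf:
--         tokens.append(''.join(buf))
--     return [''.join(t if isinstance(t, str) else z[t] for t in tokens) for z in Z]
-- ===== Notes on version B (the rewrite author's own statement) =====
-- stated objective: faster
-- what changed: B parses the template string once into a token list (merged literal runs and digit indexes) and then only assembles per z, instead of re-parsing every character of s (with a try/except int(c) per char) for every z as A does.
import Mathlib
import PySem

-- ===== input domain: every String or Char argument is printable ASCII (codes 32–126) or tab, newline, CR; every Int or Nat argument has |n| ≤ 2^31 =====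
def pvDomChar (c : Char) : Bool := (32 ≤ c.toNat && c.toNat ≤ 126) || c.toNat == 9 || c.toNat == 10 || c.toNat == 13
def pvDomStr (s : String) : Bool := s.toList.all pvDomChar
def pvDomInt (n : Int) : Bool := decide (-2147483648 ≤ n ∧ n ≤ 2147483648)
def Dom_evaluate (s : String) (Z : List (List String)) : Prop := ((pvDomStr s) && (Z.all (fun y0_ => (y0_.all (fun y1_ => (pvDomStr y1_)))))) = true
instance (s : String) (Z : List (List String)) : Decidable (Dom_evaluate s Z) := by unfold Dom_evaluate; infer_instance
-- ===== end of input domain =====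

-- B parses the template once into a token list (merged literal runs + digit indexes) and then
-- only assembles per z, instead of re-parsing every character of s for every z (alternative decomposition).


-- ===== PORT A =====
-- `int(c)` on a SINGLE character: on the ASCII domain it succeeds exactly for '0'..'9'
-- (whitespace/sign/'_' alone are ValueError), yielding c.toNat - 48; ported by hand as
-- `c.isDigit` / `(c.toNat : Int) - 48` — exact on Dom. z[i] (i ≥ 0 here) is pyGetD under Pre_.
def pvEvalOnceA (s : String) (z : List String) : String :=
  String.ofList
    (s.toList.foldl
      (fun out c =>
        out ++ (if c.isDigit then (PySem.List.pyGetD z ((c.toNat : Int) - 48) "").toList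
                else [c]))
      [])

def evaluate (s : String) (Z : List (List String)) : List String :=
  Z.map (fun z => pvEvalOnceA s z)

-- ===== PORT B =====
inductive PvTok : Type
  | lit : List Char → PvTok   -- a merged run of non-digit literal characters
  | idx : Int → PvTok         -- a digit index
  deriving DecidableEq, Repr

-- flush the literal buffer: `if buf: tokens.append(''.join(buf))`
def pvFlush (toks : List PvTok) (buf : List Char) : List PvTok :=
  if buf = [] then toks else toks ++ [PvTok.lit buf]

-- one step of B's tokenizing loop (int(c) ported as c.isDigit, exact on Dom as above)
def pvTokStep (st : List PvTok × List Char) (c : Char) : List PvTok × List Char :=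
  if c.isDigit then (pvFlush st.1 st.2 ++ [PvTok.idx ((c.toNat : Int) - 48)], [])
  else (st.1, st.2 ++ [c])

def pvTokenize (s : String) : List PvTok :=
  let st := s.toList.foldl pvTokStep ([], [])
  pvFlush st.1 st.2

-- value of one token for a given z (''.join over these is concatenation = flatten)
def pvTokVal (z : List String) : PvTok → List Char
  | PvTok.lit l => l
  | PvTok.idx i => (PySem.List.pyGetD z i "").toList

def pvAssemble (toks : List PvTok) (z : List String) : String :=
  String.ofList ((toks.map (pvTokVal z)).flatten)

def evaluate_alt (s : String) (Z : List (List String)) : List String :=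
  let toks := pvTokenize s
  Z.map (fun z => pvAssemble toks z)

-- ===== PRECONDITION & SPEC =====
-- Python A raises IndexError when some digit d occurs in s with d ≥ len(z) for some z in Z;
-- exactly those inputs are excluded (B raises identically there).
def Pre_evaluate (s : String) (Z : List (List String)) : Prop :=
  (Z.all fun z => s.toList.all fun c => !c.isDigit || decide (c.toNat - 48 < z.length)) = true

instance (s : String) (Z : List (List String)) : Decidable (Pre_evaluate s Z) := by
  unfold Pre_evaluate; infer_instance

def pvWitness_evaluate : String × List (List String) := ("a0b 1!", [["x", "y"], ["u", "vv"]])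

def Spec_evaluate (s : String) (Z : List (List String)) (out : List String) : Prop := out = evaluate_alt s Z
instance (s : String) (Z : List (List String)) (out : List String) : Decidable (Spec_evaluate s Z out) := by unfold Spec_evaluate; infer_instance

-- ===== CLAIM (what is proved, stated in full; the proofs are below) =====
def Claim_equal_evaluate : Prop := ∀ (s : String) (Z : List (List String)), Dom_evaluate s Z → Pre_evaluate s Z → Spec_evaluate s Z (evaluate s Z)

-- ===== LEMMAS AND PROOFS =====

-- per-character contribution shared by both characterisations
def pvG (z : List String) (c : Char) : List Char :=
  if c.isDigit then (PySem.List.pyGetD z ((c.toNat : Int) - 48) "").toList else [c]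

theorem pvEvalOnceA_eq (s : String) (z : List String) :
    pvEvalOnceA s z = String.ofList (s.toList.flatMap (pvG z)) := by
  unfold pvEvalOnceA pvG
  rw [PySem.List.foldl_append_eq_flatMap]
  simp

theorem pvTokVal_flush (z : List String) (toks : List PvTok) (buf : List Char) :
    ((pvFlush toks buf).map (pvTokVal z)).flatten
      = (toks.map (pvTokVal z)).flatten ++ buf := by
  unfold pvFlush
  split_ifs with h <;> simp [h, pvTokVal]

theorem pvTokenize_loop (z : List String) (cs : List Char) :
    ∀ (toks : List PvTok) (buf : List Char),
      (((pvFlush (cs.foldl pvTokStep (toks, buf)).1 (cs.foldl pvTokStep (toks, buf)).2).map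
          (pvTokVal z)).flatten)
        = (toks.map (pvTokVal z)).flatten ++ buf ++ cs.flatMap (pvG z) := by
  induction cs with
  | nil => intro toks buf; simp [pvTokVal_flush]
  | cons c cs ih =>
    intro toks buf
    by_cases hd : c.isDigit
    · simp only [List.foldl_cons, pvTokStep, hd, if_true]
      rw [ih]
      simp [pvTokVal_flush, pvTokVal, pvG, hd]
    · simp only [List.foldl_cons, pvTokStep, hd]
      rw [ih]
      simp [pvG, hd]

theorem pvAssemble_eq (s : String) (z : List String) :
    pvAssemble (pvTokenize s) z = String.ofList (s.toList.flatMap (pvG z)) := by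
  unfold pvAssemble pvTokenize
  rw [pvTokenize_loop z s.toList [] []]
  simp

-- ===== VERDICT (by name: the statement is the Claim_ definition above) =====
theorem evaluate_spec : Claim_equal_evaluate := by
  intro s Z _ _
  unfold Spec_evaluate evaluate evaluate_alt
  refine List.map_congr_left (fun z _ => ?_)
  rw [pvEvalOnceA_eq, pvAssemble_eq]
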